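-- pv_equiv track=rewrite | github.com/wyk18703232953/myResearch | codeComplex/data/filteredData/python/linear/python_linear_0380.py | generate_input_string
-- ===== SOURCE A (Python) =====
-- def generate_input_string(n: int) -> str:
--     if n <= 0:
--         return ""
--     chars = []
--     base = "120"
--     for i in range(n):
--         chars.append(base[i % len(base)])
--     return "".join(chars)
-- ===== SOURCE B (Python) =====
-- def generate_input_string(n: int) -> str:
--     if n <= 0:
--         return ""
--     return ("120" * (n // 3 + 1))[:n]
-- ===== Notes on version B (the rewrite author's own statement) =====
-- stated objective: faster
-- what changed: Replaces the per-index loop appending base[i % 3] character by character with a closed-form repeat-then-truncate expression ('120' * (n//3 + 1))[:n], done in C by str.__mul__ and slicing.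
import Mathlib
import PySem

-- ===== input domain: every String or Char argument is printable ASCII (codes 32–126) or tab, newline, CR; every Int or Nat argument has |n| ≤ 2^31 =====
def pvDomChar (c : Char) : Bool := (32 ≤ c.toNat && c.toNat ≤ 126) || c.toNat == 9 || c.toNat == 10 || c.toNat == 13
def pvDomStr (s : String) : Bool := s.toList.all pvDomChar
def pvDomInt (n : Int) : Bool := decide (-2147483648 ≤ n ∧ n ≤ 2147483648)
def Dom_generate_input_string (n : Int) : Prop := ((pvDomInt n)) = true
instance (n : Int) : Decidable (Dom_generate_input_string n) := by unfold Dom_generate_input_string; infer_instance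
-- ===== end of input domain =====

-- B replaces A's per-index loop (append base[i % 3] for each i) with a closed-form
-- repeat-then-truncate expression ('120' * (n//3 + 1))[:n]; objective: simpler.

-- ===== PORT A =====
def generate_input_string (n : Int) : String :=
  if n ≤ 0 then "" else
    let base := "120"
    let chars : List Char :=
      (PySem.List.pyRange 0 n 1).foldl
        (fun acc i =>
          acc ++ (PySem.Str.pyGet? base (PySem.Int.mod i (PySem.Str.len base))).toList) []
    String.ofList chars

-- ===== PORT B =====
def generate_input_string_alt (n : Int) : String :=
  if n ≤ 0 then "" else
    String.ofList
      (PySem.List.slice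
        (PySem.List.pyRepeat "120".toList (PySem.Int.floordiv n 3 + 1))
        none (some n))

-- ===== PRECONDITION & SPEC =====
def Spec_generate_input_string (n : Int) (out : String) : Prop := out = generate_input_string_alt n
instance (n : Int) (out : String) : Decidable (Spec_generate_input_string n out) := by unfold Spec_generate_input_string; infer_instance

-- ===== CLAIM (what is proved, stated in full; the proofs are below) =====
def Claim_equal_generate_input_string : Prop := ∀ (n : Int), Dom_generate_input_string n → Spec_generate_input_string n (generate_input_string n)

-- ===== LEMMAS AND PROOFS =====

-- the character at position k of the repeating pattern
def pvPat (k : Nat) : Char := if k % 3 = 0 then '1' else if k % 3 = 1 then '2' else '0'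

theorem pvPat_add_three (k : Nat) : pvPat (3 + k) = pvPat k := by
  unfold pvPat
  have : (3 + k) % 3 = k % 3 := by omega
  rw [this]

theorem pvRep_eq (j : Nat) :
    (List.replicate j ("120".toList)).flatten = (List.range (3 * j)).map pvPat := by
  induction j with
  | zero => simp
  | succ j ih =>
    rw [List.replicate_succ, List.flatten_cons, ih,
      show 3 * (j + 1) = 3 + 3 * j from by ring, List.range_add, List.map_append, List.map_map]
    have h1 : "120".toList = (List.range 3).map pvPat := by decide
    have h2 : (List.range (3 * j)).map (pvPat ∘ fun x => 3 + x)
        = (List.range (3 * j)).map pvPat :=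
      List.map_congr_left (fun k _ => pvPat_add_three k)
    rw [h1, h2]

theorem pvStep (k : Nat) :
    (PySem.Str.pyGet? "120" (PySem.Int.mod ((0 : Int) + ↑k) (PySem.Str.len "120"))).toList
      = [pvPat k] := by
  have hlen : PySem.Str.len "120" = 3 := by decide
  rw [hlen, zero_add]
  have hmod : PySem.Int.mod (↑k) 3 = ((k % 3 : Nat) : Int) := by
    rw [PySem.Int.mod_eq_emod_of_pos (by norm_num)]
    omega
  rw [hmod, PySem.Str.pyGet?_natCast]
  have h3 : k % 3 = 0 ∨ k % 3 = 1 ∨ k % 3 = 2 := by omega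
  rcases h3 with h | h | h <;> simp [h, pvPat]

theorem pvA_chars (n : Int) :
    (PySem.List.pyRange 0 n 1).foldl
      (fun acc i =>
        acc ++ (PySem.Str.pyGet? "120" (PySem.Int.mod i (PySem.Str.len "120"))).toList) []
      = (List.range n.toNat).map pvPat := by
  rw [PySem.List.foldl_append_eq_flatMap, List.nil_append, PySem.List.pyRange_one,
    Int.sub_zero, List.flatMap_map]
  have h1 := List.flatMap_congr (l := List.range n.toNat)
      (f := fun a => (PySem.Str.pyGet? "120"
        (PySem.Int.mod ((0 : Int) + ↑a) (PySem.Str.len "120"))).toList)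
      (g := fun k => [pvPat k]) (fun k _ => pvStep k)
  rw [h1, ← List.map_eq_flatMap]

-- ===== VERDICT (by name: the statement is the Claim_ definition above) =====
theorem generate_input_string_spec : Claim_equal_generate_input_string := by
  intro n _
  unfold Spec_generate_input_string generate_input_string generate_input_string_alt
  by_cases hn : n ≤ 0
  · simp [hn]
  · simp only [hn, if_false]
    have hn' : 0 < n := by omega
    congr 1
    rw [pvA_chars n]
    unfold PySem.List.pyRepeat
    set f := PySem.Int.floordiv n 3 with hf
    have hf0 : 0 ≤ f := by
      rw [hf, PySem.Int.le_floordiv_iff_mul_le (by norm_num)]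
      omega
    have hlt : n < (f + 1) * 3 :=
      (PySem.Int.floordiv_lt_iff_lt_mul (a := n) (b := 3) (q := f + 1) (by norm_num)).mp
        (by omega)
    rw [PySem.List.slice_to _ (by omega : (0:Int) ≤ n), pvRep_eq (f + 1).toNat,
      ← List.map_take, List.take_range,
      show min n.toNat (3 * (f + 1).toNat) = n.toNat from by omega]
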